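-- pv_equiv track=rewrite | github.com/jsyeh/leetcode | 2038/remove-colored-pieces-if-both-neighbors-are-the-same-color.py | winnerOfGame
-- ===== SOURCE A (Python) =====
-- def winnerOfGame(colors: str) -> bool:
--     H = {'A':0, 'B':0}
--     for i in range(1, len(colors)-1):
--         if colors[i-1]==colors[i] and colors[i]==colors[i+1]:
--             H[colors[i]] += 1 # 有連續3個，就得1分
--
--     # A > B 就是 A 勝
--     if H['A'] > H['B']: # 不能等於，因為A無法先手，A就敗
--         return True
--     else:
--         return False
-- ===== SOURCE B (Python) =====
-- def _flush(a, b, cur, run):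
--     # credit a finished run of `run` copies of `cur` to its color's tally
--     if cur == 'A':
--         return a + max(run - 2, 0), b
--     if cur == 'B':
--         return a, b + max(run - 2, 0)
--     return a, b
--
--
-- def winnerOfGame(colors: str) -> bool:
--     # run-length decomposition: a run of length L yields max(L-2, 0) moves
--     a = 0
--     b = 0
--     cur = None
--     run = 0
--     for ch in colors:
--         if ch == cur:
--             run += 1
--         else:
--             a, b = _flush(a, b, cur, run)
--             cur = ch
--             run = 1
--     a, b = _flush(a, b, cur, run)
--     return a > b
-- ===== Notes on version B (the rewrite author's own statement) =====
-- stated objective: alternative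
-- what changed: B replaces the per-index sliding-window triple test with dict tallies by a single run-length pass: each maximal run of one color of length L contributes max(L-2,0) to that color's tally, and the two tallies are compared at the end.
import Mathlib
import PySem

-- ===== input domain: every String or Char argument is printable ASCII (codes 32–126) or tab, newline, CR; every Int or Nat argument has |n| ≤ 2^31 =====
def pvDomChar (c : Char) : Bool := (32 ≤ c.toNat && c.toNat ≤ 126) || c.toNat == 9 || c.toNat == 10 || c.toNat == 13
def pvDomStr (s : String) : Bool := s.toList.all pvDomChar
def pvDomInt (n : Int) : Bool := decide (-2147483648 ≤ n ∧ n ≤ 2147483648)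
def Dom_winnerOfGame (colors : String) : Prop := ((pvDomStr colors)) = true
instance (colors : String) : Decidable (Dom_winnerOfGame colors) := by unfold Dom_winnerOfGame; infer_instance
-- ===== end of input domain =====

-- B replaces A's per-index sliding-window triple test (dict tallies) by a single run-length
-- pass: each maximal run of length L contributes max(L-2,0) to its color; same O(n) cost.


-- ===== PORT A =====
def winnerOfGame (colors : String) : Bool :=
  let cs := colors.toList
  -- H = {'A': 0, 'B': 0}
  let H0 : PySem.Dict Char Int := PySem.Dict.ofList [('A', 0), ('B', 0)]
  -- for i in range(1, len(colors)-1): if colors[i-1]==colors[i] and colors[i]==colors[i+1]: H[colors[i]] += 1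
  -- (indices i-1, i, i+1 are always in range here; a missing key — Python KeyError — is excluded by Pre_,
  --  so Dict.modify coincides with the read-increment-write)
  let H := (PySem.List.pyRange 1 ((cs.length : Int) - 1) 1).foldl
    (fun H i =>
      if (PySem.List.pyGetD cs (i - 1) ' ' == PySem.List.pyGetD cs i ' ')
          && (PySem.List.pyGetD cs i ' ' == PySem.List.pyGetD cs (i + 1) ' ') then
        H.modify (PySem.List.pyGetD cs i ' ') 0 (· + 1)
      else H) H0
  -- if H['A'] > H['B']: return True else: return False
  if H.getD 'A' 0 > H.getD 'B' 0 then true else false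

-- ===== PORT B =====
-- _flush(a, b, cur, run)
def pvFlush (a b : Int) (cur : Option Char) (run : Int) : Int × Int :=
  if cur = some 'A' then (a + max (run - 2) 0, b)
  else if cur = some 'B' then (a, b + max (run - 2) 0)
  else (a, b)

-- the for-loop of B, carrying (a, b, cur, run); the final _flush is the base case
def pvLoop : List Char → Int → Int → Option Char → Int → Int × Int
  | [], a, b, cur, run => pvFlush a b cur run
  | ch :: t, a, b, cur, run =>
    if some ch = cur then pvLoop t a b cur (run + 1)
    else
      let p := pvFlush a b cur run
      pvLoop t p.1 p.2 (some ch) 1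

def winnerOfGame_alt (colors : String) : Bool :=
  let p := pvLoop colors.toList 0 0 none 0
  decide (p.1 > p.2)

-- ===== PRECONDITION & SPEC =====
-- Python A raises KeyError exactly when three consecutive equal characters are a character
-- other than the two color letters (the dict H then has no such key); Pre_ excludes exactly those.
def Pre_winnerOfGame (colors : String) : Prop :=
  ∀ w ∈ colors.toList.zip (colors.toList.tail.zip colors.toList.tail.tail),
    w.1 = w.2.1 → w.2.1 = w.2.2 → (w.1 = 'A' ∨ w.1 = 'B')
instance (colors : String) : Decidable (Pre_winnerOfGame colors) := by
  unfold Pre_winnerOfGame; infer_instance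
def pvWitness_winnerOfGame : String := "AAABBB"

def Spec_winnerOfGame (colors : String) (out : Bool) : Prop := out = winnerOfGame_alt colors
instance (colors : String) (out : Bool) : Decidable (Spec_winnerOfGame colors out) := by unfold Spec_winnerOfGame; infer_instance

-- ===== CLAIM (what is proved, stated in full; the proofs are below) =====
def Claim_equal_winnerOfGame : Prop := ∀ (colors : String), Dom_winnerOfGame colors → Pre_winnerOfGame colors → Spec_winnerOfGame colors (winnerOfGame colors)

-- ===== LEMMAS AND PROOFS =====

-- reference count: number of positions where three consecutive characters all equal v
def cnt (v : Char) : List Char → Nat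
  | x :: y :: z :: t => (if x = v ∧ y = v ∧ z = v then 1 else 0) + cnt v (y :: z :: t)
  | _ => 0

theorem cnt_repl (r : Nat) (c ch v : Char) (t : List Char) (hne : ch ≠ c) :
    cnt v (List.replicate r c ++ ch :: t) = (if v = c then r - 2 else 0) + cnt v (ch :: t) := by
  induction r using Nat.strong_induction_on with
  | _ r ih =>
    match r with
    | 0 => simp
    | 1 =>
      simp only [List.replicate_one, List.cons_append, List.nil_append]
      cases t with
      | nil => simp [cnt]
      | cons z t' =>
        have h : ¬ (c = v ∧ ch = v ∧ z = v) := by rintro ⟨rfl, rfl, _⟩; exact hne rfl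
        simp [cnt, h]
    | 2 =>
      have h1 := ih 1 (by omega)
      simp only [List.replicate_one, List.cons_append, List.nil_append] at h1
      have h : ¬ (c = v ∧ c = v ∧ ch = v) := by rintro ⟨rfl, -, rfl⟩; exact hne rfl
      simp only [show List.replicate 2 c ++ ch :: t = c :: c :: ch :: t by rfl]
      simp [cnt, h, h1]
    | (m+3) =>
      have h1 := ih (m+2) (by omega)
      have e : List.replicate (m+3) c ++ ch :: t = c :: c :: c :: (List.replicate m c ++ ch :: t) := by
        simp [List.replicate_succ]
      have e2 : List.replicate (m+2) c ++ ch :: t = c :: c :: (List.replicate m c ++ ch :: t) := by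
        simp [List.replicate_succ]
      rw [e]
      show (if c = v ∧ c = v ∧ c = v then 1 else 0) + cnt v (c :: c :: (List.replicate m c ++ ch :: t)) = _
      rw [← e2, h1]
      by_cases hv : v = c
      · subst hv; simp; omega
      · have hv' : ¬ c = v := fun h => hv h.symm
        simp [hv, hv']

theorem cnt_repl_nil (r : Nat) (c v : Char) :
    cnt v (List.replicate r c) = (if v = c then r - 2 else 0) := by
  induction r using Nat.strong_induction_on with
  | _ r ih =>
    match r with
    | 0 => simp [cnt]
    | 1 => simp [cnt]
    | 2 => simp [show List.replicate 2 c = [c, c] by rfl, cnt]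
    | (m+3) =>
      have h1 := ih (m+2) (by omega)
      have e : List.replicate (m+3) c = c :: c :: c :: List.replicate m c := by
        simp [List.replicate_succ]
      have e2 : List.replicate (m+2) c = c :: c :: List.replicate m c := by
        simp [List.replicate_succ]
      rw [e]
      show (if c = v ∧ c = v ∧ c = v then 1 else 0) + cnt v (c :: c :: List.replicate m c) = _
      rw [← e2, h1]
      by_cases hv : v = c
      · subst hv; simp; omega
      · have hv' : ¬ c = v := fun h => hv h.symm
        simp [hv, hv']

theorem pvLoop_run (t : List Char) : ∀ (a b : Int) (c : Char) (r : Nat), 1 ≤ r →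
    pvLoop t a b (some c) (r : Int) =
      (a + (cnt 'A' (List.replicate r c ++ t) : Int), b + (cnt 'B' (List.replicate r c ++ t) : Int)) := by
  induction t with
  | nil =>
    intro a b c r hr
    simp only [pvLoop, pvFlush, List.append_nil, cnt_repl_nil]
    have hmax : max ((r : Int) - 2) 0 = ((r - 2 : Nat) : Int) := by omega
    by_cases hA : c = 'A'
    · subst hA; simp [hmax]
    · by_cases hB : c = 'B'
      · subst hB; simp [hA, hmax]
      · simp [hA, hB, Ne.symm hA, Ne.symm hB]
  | cons ch t ih =>
    intro a b c r hr
    by_cases hc : ch = c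
    · subst hc
      simp only [pvLoop]
      have : ((r : Int) + 1) = ((r + 1 : Nat) : Int) := by push_cast; ring
      rw [this, ih a b ch (r+1) (by omega)]
      have e : List.replicate (r+1) ch ++ t = List.replicate r ch ++ ch :: t := by
        rw [List.replicate_succ']; simp
      rw [e]; simp
    · have hcur : ¬ (some ch = some c) := by simp [hc]
      simp only [pvLoop, if_neg hcur]
      have h1 := ih (pvFlush a b (some c) (r : Int)).1 (pvFlush a b (some c) (r : Int)).2 ch 1 le_rfl
      rw [Nat.cast_one] at h1
      rw [h1]
      simp only [List.replicate_one, List.cons_append, List.nil_append]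
      rw [cnt_repl r c ch 'A' t hc, cnt_repl r c ch 'B' t hc]
      have hmax : max ((r : Int) - 2) 0 = ((r - 2 : Nat) : Int) := by omega
      simp only [pvFlush]
      by_cases hA : c = 'A'
      · subst hA; simp [hmax]; ring
      · by_cases hB : c = 'B'
        · subst hB; simp [hA, hmax]; ring
        · simp [hA, hB, Ne.symm hA, Ne.symm hB]

theorem pvLoop_top (cs : List Char) : pvLoop cs 0 0 none 0 = ((cnt 'A' cs : Int), (cnt 'B' cs : Int)) := by
  cases cs with
  | nil => simp [pvLoop, pvFlush, cnt]
  | cons x t =>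
    have h := pvLoop_run t 0 0 x 1 le_rfl
    simp only [Nat.cast_one, List.replicate_one, List.cons_append, List.nil_append] at h
    simp [pvLoop, pvFlush, h]

theorem A_fold_getD (cs : List Char) (v : Char) : ∀ (l : List Int) (H : PySem.Dict Char Int),
    (l.foldl (fun H i =>
      if (PySem.List.pyGetD cs (i - 1) ' ' == PySem.List.pyGetD cs i ' ')
          && (PySem.List.pyGetD cs i ' ' == PySem.List.pyGetD cs (i + 1) ' ') then
        H.modify (PySem.List.pyGetD cs i ' ') 0 (· + 1)
      else H) H).getD v 0
    = H.getD v 0 + (l.countP (fun i =>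
        ((PySem.List.pyGetD cs (i - 1) ' ' == PySem.List.pyGetD cs i ' ')
          && (PySem.List.pyGetD cs i ' ' == PySem.List.pyGetD cs (i + 1) ' '))
        && (PySem.List.pyGetD cs i ' ' == v)) : Int) := by
  intro l
  induction l with
  | nil => simp
  | cons i l ih =>
    intro H
    simp only [List.foldl_cons, List.countP_cons]
    by_cases hcond : ((PySem.List.pyGetD cs (i - 1) ' ' == PySem.List.pyGetD cs i ' ')
          && (PySem.List.pyGetD cs i ' ' == PySem.List.pyGetD cs (i + 1) ' ')) = true
    · rw [if_pos hcond, ih]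
      rw [PySem.Dict.getD_modify]
      by_cases hv : v = PySem.List.pyGetD cs i ' '
      · simp [hv, hcond]; ring
      · have : (PySem.List.pyGetD cs i ' ' == v) = false := by
          simp; exact fun h => hv h.symm
        simp [hv, hcond, this]
    · rw [if_neg hcond, ih]
      have hp : (((PySem.List.pyGetD cs (i - 1) ' ' == PySem.List.pyGetD cs i ' ')
          && (PySem.List.pyGetD cs i ' ' == PySem.List.pyGetD cs (i + 1) ' '))
          && (PySem.List.pyGetD cs i ' ' == v)) = false := by
        cases h1 : ((PySem.List.pyGetD cs (i - 1) ' ' == PySem.List.pyGetD cs i ' ')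
          && (PySem.List.pyGetD cs i ' ' == PySem.List.pyGetD cs (i + 1) ' ')) with
        | false => simp
        | true => exact absurd h1 hcond
      simp [hp]

theorem shift_getD (x : Char) (t : List Char) (j : Nat) :
    PySem.List.pyGetD (x :: t) ((j + 1 : Nat) : Int) ' ' = PySem.List.pyGetD t (j : Nat) ' ' := by
  rw [PySem.List.pyGetD_natCast, PySem.List.pyGetD_natCast, List.getD_cons_succ]

theorem windowCount (v : Char) : ∀ (cs : List Char),
    (PySem.List.pyRange 1 ((cs.length : Int) - 1) 1).countP (fun i =>
        ((PySem.List.pyGetD cs (i - 1) ' ' == PySem.List.pyGetD cs i ' ')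
          && (PySem.List.pyGetD cs i ' ' == PySem.List.pyGetD cs (i + 1) ' '))
        && (PySem.List.pyGetD cs i ' ' == v)) = cnt v cs := by
  intro cs
  induction cs with
  | nil => rw [PySem.List.pyRange_one_eq_nil (by norm_num)]; rfl
  | cons x t ih =>
    cases t with
    | nil => rw [PySem.List.pyRange_one_eq_nil (by norm_num)]; rfl
    | cons y t2 =>
      cases t2 with
      | nil => rw [PySem.List.pyRange_one_eq_nil (by norm_num)]; rfl
      | cons z t3 =>
        -- cs = x :: y :: z :: t3
        have hlen : ((x :: y :: z :: t3).length : Int) - 1 = (t3.length : Int) + 2 := by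
          simp; ring
        rw [hlen, PySem.List.pyRange_one_cons (by omega), List.countP_cons]
        -- tail part: shift indices by one and apply ih
        have htail :
            (PySem.List.pyRange (1 + 1) ((t3.length : Int) + 2) 1).countP (fun i =>
              ((PySem.List.pyGetD (x :: y :: z :: t3) (i - 1) ' ' == PySem.List.pyGetD (x :: y :: z :: t3) i ' ')
                && (PySem.List.pyGetD (x :: y :: z :: t3) i ' ' == PySem.List.pyGetD (x :: y :: z :: t3) (i + 1) ' '))
              && (PySem.List.pyGetD (x :: y :: z :: t3) i ' ' == v))
            = cnt v (y :: z :: t3) := by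
          rw [← ih]
          have e1 : PySem.List.pyRange (1 + 1) ((t3.length : Int) + 2) 1
              = (List.range t3.length).map (fun k => ((k + 2 : Nat) : Int)) := by
            rw [PySem.List.pyRange_one]
            have : ((t3.length : Int) + 2 - (1 + 1)).toNat = t3.length := by omega
            rw [this]
            apply List.map_congr_left
            intro k _; omega
          have e2 : PySem.List.pyRange 1 (((y :: z :: t3).length : Int) - 1) 1
              = (List.range t3.length).map (fun k => ((k + 1 : Nat) : Int)) := by
            rw [PySem.List.pyRange_one]
            have : (((y :: z :: t3).length : Int) - 1 - 1).toNat = t3.length := by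
              simp only [List.length_cons]; omega
            rw [this]
            apply List.map_congr_left
            intro k _; omega
          rw [e1, e2, List.countP_map, List.countP_map]
          apply List.countP_congr
          intro k _
          simp only [Function.comp]
          have a1 : ((k + 2 : Nat) : Int) - 1 = ((k + 1 : Nat) : Int) := by push_cast; ring
          have a2 : ((k + 2 : Nat) : Int) + 1 = ((k + 3 : Nat) : Int) := by push_cast; ring
          have a3 : ((k + 1 : Nat) : Int) - 1 = ((k : Nat) : Int) := by push_cast; ring
          have a4 : ((k + 1 : Nat) : Int) + 1 = ((k + 2 : Nat) : Int) := by push_cast; ring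
          rw [a1, a2, a3, a4]
          rw [show ((k+1:Nat):Int) = (((k)+1:Nat):Int) from rfl]
          rw [shift_getD x (y :: z :: t3) k,
              show ((k+2:Nat):Int) = (((k+1)+1:Nat):Int) from rfl,
              shift_getD x (y :: z :: t3) (k+1),
              show ((k+3:Nat):Int) = (((k+2)+1:Nat):Int) from rfl,
              shift_getD x (y :: z :: t3) (k+2)]
        rw [htail]
        -- head part: the window at i = 1
        have h0 : PySem.List.pyGetD (x :: y :: z :: t3) (1 - 1 : Int) ' ' = x := by norm_num [PySem.List.pyGetD_zero_cons]
        have h1 : PySem.List.pyGetD (x :: y :: z :: t3) (1 : Int) ' ' = y := by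
          rw [show (1 : Int) = ((0 + 1 : Nat) : Int) by norm_num, shift_getD]
          simp [PySem.List.pyGetD_zero_cons]
        have h2 : PySem.List.pyGetD (x :: y :: z :: t3) (1 + 1 : Int) ' ' = z := by
          rw [show (1 + 1 : Int) = ((1 + 1 : Nat) : Int) by norm_num, shift_getD]
          rw [show ((1:Nat):Int) = ((0 + 1 : Nat) : Int) by norm_num, shift_getD]
          simp [PySem.List.pyGetD_zero_cons]
        rw [h0, h1, h2]
        have hcnt : cnt v (x :: y :: z :: t3)
            = (if x = v ∧ y = v ∧ z = v then 1 else 0) + cnt v (y :: z :: t3) := rfl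
        rw [hcnt]
        by_cases hx : x = v ∧ y = v ∧ z = v
        · obtain ⟨rfl, h, h'⟩ := hx
          subst h; subst h'
          simp [Nat.add_comm]
        · have : (((x == y) && (y == z)) && (y == v)) = false := by
            simp only [Bool.and_eq_false_iff, beq_eq_false_iff_ne, ne_eq]
            by_contra hcon
            rw [not_or, not_or] at hcon
            obtain ⟨⟨hxy, hyz⟩, hyv⟩ := hcon
            rw [not_not] at hxy hyz hyv
            exact hx ⟨hxy ▸ hyv, hyv, hyz ▸ hyv⟩
          simp [this, hx]

-- ===== VERDICT (by name: the statement is the Claim_ definition above) =====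
theorem winnerOfGame_spec : Claim_equal_winnerOfGame := by
  intro colors _ _
  unfold Spec_winnerOfGame winnerOfGame winnerOfGame_alt
  simp only [pvLoop_top]
  rw [A_fold_getD colors.toList 'A' _ _, A_fold_getD colors.toList 'B' _ _,
      windowCount 'A' colors.toList, windowCount 'B' colors.toList]
  have hA : (PySem.Dict.ofList [('A', (0 : Int)), ('B', 0)]).getD 'A' 0 = 0 := by decide
  have hB : (PySem.Dict.ofList [('A', (0 : Int)), ('B', 0)]).getD 'B' 0 = 0 := by decide
  rw [hA, hB]
  simp
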